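-- pv_equiv track=rewrite | github.com/5hjiwoo/knu-course-projects | information-security/monoalphabetic-cipher-decrypt/assignment2.py | make_mapping
-- ===== SOURCE A (Python) =====
-- def make_mapping(cipher_word, plain_word):
--     mapping = {}
--     for c, p in zip(cipher_word, plain_word):
--         if not c.isalpha():
--             if c != p:
--                 return {}
--             continue
--
--         c_upper = c.upper()
--         p_upper = p.upper()
--
--         if c_upper in mapping and mapping[c_upper] != p_upper:
--             return {}
--         mapping[c_upper] = p_upper
--
--     return mapping
-- ===== SOURCE B (Python) =====
-- def make_mapping(cipher_word, plain_word):
--     # Two-phase: collect cipher->set(plain) groups, then verify and build.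
--     groups = {}
--     bad = False
--     for c, p in zip(cipher_word, plain_word):
--         if c.isalpha():
--             groups.setdefault(c.upper(), set()).add(p.upper())
--         elif c != p:
--             bad = True
--     if bad or any(len(s) > 1 for s in groups.values()):
--         return {}
--     return {c: next(iter(s)) for c, s in groups.items()}
-- ===== Notes on version B (the rewrite author's own statement) =====
-- stated objective: alternative
-- what changed: Replaces A's single pass with inline early-return conflict detection by a collect-then-verify two-phase structure: one scan groups plain letters into a dict of sets per cipher letter and flags non-alpha mismatches, then a separate verification pass decides {} vs the built mapping.
import Mathlib
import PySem

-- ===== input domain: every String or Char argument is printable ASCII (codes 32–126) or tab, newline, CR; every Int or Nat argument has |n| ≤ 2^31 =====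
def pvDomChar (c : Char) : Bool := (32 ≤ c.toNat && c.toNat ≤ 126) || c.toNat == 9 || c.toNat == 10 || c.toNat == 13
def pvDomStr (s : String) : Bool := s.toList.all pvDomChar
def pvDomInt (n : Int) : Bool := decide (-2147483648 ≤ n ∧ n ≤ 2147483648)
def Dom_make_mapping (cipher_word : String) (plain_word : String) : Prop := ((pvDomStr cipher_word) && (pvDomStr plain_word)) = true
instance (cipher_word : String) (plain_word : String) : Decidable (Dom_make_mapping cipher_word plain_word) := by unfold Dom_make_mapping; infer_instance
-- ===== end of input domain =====

-- B replaces A's inline early-return conflict detection with a collect-then-verify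
-- two-phase structure (group plain letters per cipher letter, then check); alternative, not faster.

-- ===== PORT A =====
-- the loop of A: the early 'return {}' becomes returning Dict.empty immediately
def mmGoA : List (Char × Char) → PySem.Dict String String → PySem.Dict String String
  | [], m => m
  | (c, p) :: rest, m =>
    if !PySem.Chars.isalpha c then
      if c ≠ p then PySem.Dict.empty
      else mmGoA rest m
    else
      let cu := String.ofList [PySem.Chars.upperChar c]
      let pu := String.ofList [PySem.Chars.upperChar p]
      if m.contains cu && (m.getD cu "" != pu) then PySem.Dict.empty
      else mmGoA rest (m.insert cu pu)

def make_mapping (cipher_word : String) (plain_word : String) : List (String × String) :=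
  (mmGoA (cipher_word.toList.zip plain_word.toList) PySem.Dict.empty).items

-- ===== PORT B =====
-- phase 1 of B: accumulate groups (cipher letter → set of plain letters) and the bad flag;
-- 'groups.setdefault(cu, set()).add(pu)' is exactly 'insert cu ((getD cu ∅).add pu)'
def mmGoB : List (Char × Char) → PySem.Dict String (PySem.Set String) → Bool →
    PySem.Dict String (PySem.Set String) × Bool
  | [], g, bad => (g, bad)
  | (c, p) :: rest, g, bad =>
    if PySem.Chars.isalpha c then
      let cu := String.ofList [PySem.Chars.upperChar c]
      let pu := String.ofList [PySem.Chars.upperChar p]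
      mmGoB rest (g.insert cu (PySem.Set.add (g.getD cu PySem.Set.empty) pu)) bad
    else if c ≠ p then mmGoB rest g true
    else mmGoB rest g bad

-- phase 2 of B: verify, then build the dict; next(iter(s)) on the singleton set is its head
def mmFinish (r : PySem.Dict String (PySem.Set String) × Bool) : List (String × String) :=
  if r.2 || r.1.values.any (fun s => PySem.Set.len s > 1) then []
  else r.1.items.map (fun kv => (kv.1, kv.2.headD ""))

def make_mapping_alt (cipher_word : String) (plain_word : String) : List (String × String) :=
  mmFinish (mmGoB (cipher_word.toList.zip plain_word.toList) PySem.Dict.empty false)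

-- ===== PRECONDITION & SPEC =====
def Spec_make_mapping (cipher_word : String) (plain_word : String) (out : List (String × String)) : Prop := out = make_mapping_alt cipher_word plain_word
instance (cipher_word : String) (plain_word : String) (out : List (String × String)) : Decidable (Spec_make_mapping cipher_word plain_word out) := by unfold Spec_make_mapping; infer_instance

-- ===== CLAIM (what is proved, stated in full; the proofs are below) =====
def Claim_equal_make_mapping : Prop := ∀ (cipher_word : String) (plain_word : String), Dom_make_mapping cipher_word plain_word → Spec_make_mapping cipher_word plain_word (make_mapping cipher_word plain_word)

-- ===== LEMMAS AND PROOFS =====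

-- once bad is set it stays set
theorem mmGoB_bad (l : List (Char × Char)) (g : PySem.Dict String (PySem.Set String)) :
    (mmGoB l g true).2 = true := by
  induction l generalizing g with
  | nil => rfl
  | cons hd tl ih =>
    obtain ⟨c, p⟩ := hd
    simp only [mmGoB]
    split_ifs <;> exact ih _

-- a set with ≥ 2 elements at some key persists through phase 1
theorem mmGoB_big (l : List (Char × Char)) (g : PySem.Dict String (PySem.Set String)) (bad : Bool)
    (hnd : g.keys.Nodup)
    (h : ∃ kv ∈ g.items, 1 < kv.2.length) :
    ∃ kv ∈ (mmGoB l g bad).1.items, 1 < kv.2.length := by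
  induction l generalizing g bad with
  | nil => exact h
  | cons hd tl ih =>
    obtain ⟨c, p⟩ := hd
    simp only [mmGoB]
    split_ifs with h1 h2
    · refine ih _ _ (PySem.Dict.nodup_keys_insert _ _ _ hnd) ?_
      obtain ⟨⟨k2, s2⟩, hmem, hlen⟩ := h
      replace hlen : 1 < s2.length := hlen
      by_cases hk : k2 = String.ofList [PySem.Chars.upperChar c]
      · refine ⟨_, PySem.Dict.mem_items_insert_self _ _ _, ?_⟩
        have hget : g.getD (String.ofList [PySem.Chars.upperChar c]) PySem.Set.empty = s2 :=
          PySem.Dict.getD_of_mem_items _ (hk ▸ hmem) hnd _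
        rw [hget]
        simp only [PySem.Set.add]
        split
        · exact hlen
        · simp only [List.length_append, List.length_cons, List.length_nil]
          exact Nat.lt_succ_of_lt hlen
      · exact ⟨(k2, s2), (PySem.Dict.mem_items_insert _ _ _ _).mpr (Or.inr ⟨hmem, hk⟩), hlen⟩
    · exact ih _ _ hnd h
    · exact ih _ _ hnd h

-- a big set (or the bad flag) forces {} after phase 2
theorem mmFinish_big (r : PySem.Dict String (PySem.Set String) × Bool)
    (h : ∃ kv ∈ r.1.items, 1 < kv.2.length) : mmFinish r = [] := by
  obtain ⟨kv, hmem, hlen⟩ := h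
  have hany : (r.1.values.any fun s => decide (PySem.Set.len s > 1)) = true := by
    simp only [List.any_eq_true]
    refine ⟨kv.2, List.mem_map.mpr ⟨kv, hmem, rfl⟩, ?_⟩
    simp only [PySem.Set.len, decide_eq_true_eq]
    exact_mod_cast hlen
  simp only [mmFinish, hany, Bool.or_true, if_true]

theorem mmFinish_bad (r : PySem.Dict String (PySem.Set String) × Bool) (h : r.2 = true) :
    mmFinish r = [] := by simp [mmFinish, h]

-- the main invariant: B's groups are exactly A's mapping with singleton value sets
theorem mmMain (l : List (Char × Char)) (m : PySem.Dict String String)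
    (g : PySem.Dict String (PySem.Set String))
    (hnd : g.keys.Nodup)
    (hrel : g.items = m.items.map (fun kv => (kv.1, [kv.2]))) :
    (mmGoA l m).items = mmFinish (mmGoB l g false) := by
  induction l generalizing m g with
  | nil =>
    have hno : (g.values.any fun s => decide (PySem.Set.len s > 1)) = false := by
      simp only [List.any_eq_false]
      intro s hs
      simp only [PySem.Dict.values, hrel, List.map_map, List.mem_map] at hs
      obtain ⟨kv, _, hkv⟩ := hs
      simp [← hkv, PySem.Set.len]
    simp only [mmGoA, mmGoB, mmFinish, hno, Bool.or_false, Bool.false_eq_true, if_false]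
    rw [hrel, List.map_map,
      show ((fun kv => (kv.1, List.headD kv.2 "")) ∘ fun kv : String × String => (kv.1, [kv.2])) = id
        from funext fun kv => rfl,
      List.map_id]
  | cons hd tl ih =>
    obtain ⟨c, p⟩ := hd
    have hkeys : g.keys = m.keys := by
      simp only [PySem.Dict.keys, hrel, List.map_map]
      exact List.map_congr_left (fun kv _ => rfl)
    simp only [mmGoA, mmGoB]
    by_cases ha : PySem.Chars.isalpha c = true
    · simp only [ha, Bool.not_true, Bool.false_eq_true, if_false, if_true]
      set cu := String.ofList [PySem.Chars.upperChar c] with hcu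
      set pu := String.ofList [PySem.Chars.upperChar p] with hpu
      have hcont : g.contains cu = m.contains cu := by
        rw [PySem.Dict.contains_eq_decide_mem_keys, PySem.Dict.contains_eq_decide_mem_keys, hkeys]
      by_cases hc : m.contains cu = true
      · have hsome := PySem.Dict.contains_eq_isSome_get? m cu
        rw [hc] at hsome
        obtain ⟨v, hv⟩ := Option.isSome_iff_exists.mp hsome.symm
        have hmgetD : m.getD cu "" = v := PySem.Dict.getD_of_get?_eq_some _ _ hv
        have hmemv : (cu, v) ∈ m.items := PySem.Dict.mem_items_of_get?_eq_some _ hv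
        have hggetD : g.getD cu PySem.Set.empty = [v] := by
          refine PySem.Dict.getD_of_mem_items _ ?_ hnd _
          rw [hrel]
          exact List.mem_map.mpr ⟨(cu, v), hmemv, rfl⟩
        by_cases hvp : v = pu
        · -- no conflict: both sides overwrite the same key with the same (singleton) value
          have hcond : (m.contains cu && (m.getD cu "" != pu)) = false := by
            simp [hmgetD, hvp]
          simp only [hcond, Bool.false_eq_true, if_false]
          refine ih _ _ (PySem.Dict.nodup_keys_insert _ _ _ hnd) ?_
          have hset : PySem.Set.add (g.getD cu PySem.Set.empty) pu = [pu] := by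
            rw [hggetD, hvp]
            simp [PySem.Set.add, PySem.Set.contains]
          rw [hset, PySem.Dict.items_insert_of_contains _ _ (hcont.trans hc),
              PySem.Dict.items_insert_of_contains _ _ hc, hrel, List.map_map, List.map_map]
          apply List.map_congr_left
          intro kv _
          by_cases hk : (kv.1 == cu) = true
          · simp [Function.comp, hk]
          · simp [Function.comp, hk]
        · -- conflict: A returns {}, and B's set at cu now has two elements
          have hcond : (m.contains cu && (m.getD cu "" != pu)) = true := by
            simp [hc, hmgetD, hvp]
          simp only [hcond, if_true]
          have hbig : ∃ kv ∈ (g.insert cu (PySem.Set.add (g.getD cu PySem.Set.empty) pu)).items,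
              1 < kv.2.length := by
            refine ⟨_, PySem.Dict.mem_items_insert_self _ _ _, ?_⟩
            rw [hggetD]
            simp [PySem.Set.add, PySem.Set.contains, Ne.symm hvp]
          rw [mmFinish_big _ (mmGoB_big _ _ _ (PySem.Dict.nodup_keys_insert _ _ _ hnd) hbig)]
          rfl
      · -- fresh key: both sides append
        have hc' : m.contains cu = false := by simpa using hc
        have hcond : (m.contains cu && (m.getD cu "" != pu)) = false := by simp [hc']
        simp only [hcond, Bool.false_eq_true, if_false]
        refine ih _ _ (PySem.Dict.nodup_keys_insert _ _ _ hnd) ?_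
        have hgc : g.contains cu = false := hcont.trans hc'
        have hset : PySem.Set.add (g.getD cu PySem.Set.empty) pu = [pu] := by
          rw [PySem.Dict.getD_of_not_contains _ _ hgc]
          rfl
        rw [hset, PySem.Dict.items_insert_of_not_contains _ _ hgc,
            PySem.Dict.items_insert_of_not_contains _ _ hc', hrel]
        simp
    · have ha' : PySem.Chars.isalpha c = false := by simpa using ha
      simp only [ha', Bool.not_false, Bool.false_eq_true, if_false, if_true]
      by_cases hcp : c = p
      · simp only [hcp, ne_eq, not_true_eq_false, if_false]
        exact ih _ _ hnd hrel
      · simp only [ne_eq, hcp, not_false_eq_true, if_true]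
        rw [mmFinish_bad _ (mmGoB_bad _ _)]
        rfl

-- ===== VERDICT (by name: the statement is the Claim_ definition above) =====
theorem make_mapping_spec : Claim_equal_make_mapping := by
  intro cw pw _
  unfold Spec_make_mapping make_mapping make_mapping_alt
  exact mmMain _ _ _ (by simp [PySem.Dict.empty]) (by simp [PySem.Dict.empty])
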